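-- pv_equiv track=rewrite | github.com/probml/ssm-book | _build/jupyter_execute/chapters/ssm/inference.py | find_dishonest_intervals
-- ===== SOURCE A (Python) =====
-- def find_dishonest_intervals(z_hist):
--     spans = []
--     x_init = 0
--     for t, _ in enumerate(z_hist[:-1]):
--         if z_hist[t + 1] == 0 and z_hist[t] == 1:
--             x_end = t
--             spans.append((x_init, x_end))
--         elif z_hist[t + 1] == 1 and z_hist[t] == 0:
--             x_init = t + 1
--     return spans
-- ===== SOURCE B (Python) =====
-- def find_dishonest_intervals(z_hist):
--     n = len(z_hist)
--     # rising edges: index t+1 where 0 -> 1; falling edges: index t where 1 -> 0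
--     starts = [t + 1 for t in range(n - 1) if z_hist[t] == 0 and z_hist[t + 1] == 1]
--     ends = [t for t in range(n - 1) if z_hist[t] == 1 and z_hist[t + 1] == 0]
--     spans = []
--     i = 0
--     last = 0
--     for e in ends:
--         while i < len(starts) and starts[i] <= e:
--             last = starts[i]
--             i += 1
--         spans.append((last, e))
--     return spans
-- ===== Notes on version B (the rewrite author's own statement) =====
-- stated objective: alternative
-- what changed: Replaces A's single stateful scan with an edge-table decomposition: first build the lists of rising-edge starts and falling-edge ends, then pair each end with the most recent start via a linear two-pointer merge.
import Mathlib
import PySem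

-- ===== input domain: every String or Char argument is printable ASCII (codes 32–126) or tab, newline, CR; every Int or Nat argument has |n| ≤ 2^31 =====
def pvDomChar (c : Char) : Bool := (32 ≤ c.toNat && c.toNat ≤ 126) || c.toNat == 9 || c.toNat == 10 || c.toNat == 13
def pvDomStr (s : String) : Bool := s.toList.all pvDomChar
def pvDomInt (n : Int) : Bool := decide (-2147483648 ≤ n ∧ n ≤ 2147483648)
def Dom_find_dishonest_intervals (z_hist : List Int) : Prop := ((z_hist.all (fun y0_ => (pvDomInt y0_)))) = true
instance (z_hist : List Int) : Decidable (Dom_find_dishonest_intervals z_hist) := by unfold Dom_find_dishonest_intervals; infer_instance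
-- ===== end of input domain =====

-- B replaces A's single stateful scan by an edge-tables-then-two-pointer-merge decomposition (alternative, same cost).

-- ===== PORT A =====
-- A: one pass over t = 0 .. len-2 carrying (spans, x_init); falling edge appends (x_init, t), rising edge sets x_init := t+1.
def pvStepA (z : List Int) (st : List (Int × Int) × Int) (t : Nat) : List (Int × Int) × Int :=
  if z.getD (t + 1) 0 = 0 ∧ z.getD t 0 = 1 then (st.1 ++ [(st.2, (t : Int))], st.2)
  else if z.getD (t + 1) 0 = 1 ∧ z.getD t 0 = 0 then (st.1, (t : Int) + 1)
  else st

def find_dishonest_intervals (z_hist : List Int) : List (Int × Int) :=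
  ((List.range (z_hist.length - 1)).foldl (pvStepA z_hist) ([], 0)).1

-- ===== PORT B =====
-- rising edges: index t+1 where z[t]==0 and z[t+1]==1
def pvRises (z : List Int) : List Int :=
  (List.range (z.length - 1)).filterMap
    (fun t => if z.getD t 0 = 0 ∧ z.getD (t + 1) 0 = 1 then some ((t : Int) + 1) else none)

-- falling edges: index t where z[t]==1 and z[t+1]==0
def pvFalls (z : List Int) : List Int :=
  (List.range (z.length - 1)).filterMap
    (fun t => if z.getD t 0 = 1 ∧ z.getD (t + 1) 0 = 0 then some ((t : Int)) else none)

-- the inner while loop: consume starts ≤ e, remembering the last one consumed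
def pvAdvance (e : Int) : List Int → Int → List Int × Int
  | [], last => ([], last)
  | s :: ss, last => if s ≤ e then pvAdvance e ss s else (s :: ss, last)

-- the for loop over the ends list, carrying (remaining starts, last start)
def pvPair : List Int → List Int → Int → List (Int × Int)
  | [], _, _ => []
  | e :: es, starts, last =>
      let p := pvAdvance e starts last
      (p.2, e) :: pvPair es p.1 p.2

def find_dishonest_intervals_alt (z_hist : List Int) : List (Int × Int) :=
  pvPair (pvFalls z_hist) (pvRises z_hist) 0

-- ===== PRECONDITION & SPEC =====
def Spec_find_dishonest_intervals (z_hist : List Int) (out : List (Int × Int)) : Prop := out = find_dishonest_intervals_alt z_hist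
instance (z_hist : List Int) (out : List (Int × Int)) : Decidable (Spec_find_dishonest_intervals z_hist out) := by unfold Spec_find_dishonest_intervals; infer_instance

-- ===== CLAIM (what is proved, stated in full; the proofs are below) =====
def Claim_equal_find_dishonest_intervals : Prop := ∀ (z_hist : List Int), Dom_find_dishonest_intervals z_hist → Spec_find_dishonest_intervals z_hist (find_dishonest_intervals z_hist)

-- ===== LEMMAS AND PROOFS =====

-- common specification: each end e paired with the last start ≤ e (default xi)
def pvSpecMap (E S : List Int) (xi : Int) : List (Int × Int) :=
  E.map (fun e => (((S.filter (fun s => s ≤ e)).getLast?).getD xi, e))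

theorem pvGetLast?_getD_cons (a d : Int) (l : List Int) :
    ((a :: l).getLast?).getD d = (l.getLast?).getD a := by
  cases l with
  | nil => rfl
  | cons x xs =>
    rw [List.getLast?_cons_cons]
    cases h : (x :: xs).getLast? with
    | none => simp at h
    | some y => rfl

theorem pvGetLast?_getD_append (l1 l2 : List Int) (d : Int) :
    ((l1 ++ l2).getLast?).getD d = (l2.getLast?).getD ((l1.getLast?).getD d) := by
  rw [List.getLast?_append]
  cases l2.getLast? <;> rfl

-- generic rises/falls over an arbitrary index list (specialise L := range (n-1))
def pvRisesL (z : List Int) (L : List Nat) : List Int :=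
  L.filterMap (fun t => if z.getD t 0 = 0 ∧ z.getD (t + 1) 0 = 1 then some ((t : Int) + 1) else none)

def pvFallsL (z : List Int) (L : List Nat) : List Int :=
  L.filterMap (fun t => if z.getD t 0 = 1 ∧ z.getD (t + 1) 0 = 0 then some ((t : Int)) else none)

theorem pvMem_risesL {z : List Int} {L : List Nat} {s : Int} (h : s ∈ pvRisesL z L) :
    ∃ t ∈ L, s = (t : Int) + 1 := by
  unfold pvRisesL at h
  rcases List.mem_filterMap.mp h with ⟨t, ht, he⟩
  by_cases hc : z.getD t 0 = 0 ∧ z.getD (t + 1) 0 = 1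
  · rw [if_pos hc] at he
    exact ⟨t, ht, (Option.some.inj he).symm⟩
  · rw [if_neg hc] at he
    exact absurd he (by simp)

theorem pvMem_fallsL {z : List Int} {L : List Nat} {e : Int} (h : e ∈ pvFallsL z L) :
    ∃ t ∈ L, e = (t : Int) := by
  unfold pvFallsL at h
  rcases List.mem_filterMap.mp h with ⟨t, ht, he⟩
  by_cases hc : z.getD t 0 = 1 ∧ z.getD (t + 1) 0 = 0
  · rw [if_pos hc] at he
    exact ⟨t, ht, (Option.some.inj he).symm⟩
  · rw [if_neg hc] at he
    exact absurd he (by simp)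

-- A's loop computes pvSpecMap, by induction over a strictly increasing index list
theorem pvLoopA (z : List Int) (L : List Nat) :
    ∀ (acc : List (Int × Int)) (xi : Int), L.Pairwise (· < ·) →
      (L.foldl (pvStepA z) (acc, xi)).1 = acc ++ pvSpecMap (pvFallsL z L) (pvRisesL z L) xi := by
  induction L with
  | nil => intro acc xi _; simp [pvSpecMap, pvFallsL, pvRisesL]
  | cons t L ih =>
    intro acc xi hp
    have hgt : ∀ u ∈ L, t < u := fun u hu => (List.pairwise_cons.mp hp).1 u hu
    have hp' := (List.pairwise_cons.mp hp).2
    by_cases hf : z.getD (t + 1) 0 = 0 ∧ z.getD t 0 = 1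
    · -- falling edge at t
      have hstep : pvStepA z (acc, xi) t = (acc ++ [(xi, (t : Int))], xi) := by
        unfold pvStepA; rw [if_pos hf]
      have hrise : pvRisesL z (t :: L) = pvRisesL z L := by
        unfold pvRisesL
        apply List.filterMap_cons_none
        rw [if_neg]
        intro h
        rw [h.1] at hf
        exact absurd hf.2 (by norm_num)
      have hfall : pvFallsL z (t :: L) = (t : Int) :: pvFallsL z L := by
        unfold pvFallsL
        apply List.filterMap_cons_some
        rw [if_pos ⟨hf.2, hf.1⟩]
      have hfilt : (pvRisesL z L).filter (fun s => s ≤ (t : Int)) = [] := by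
        rw [List.filter_eq_nil_iff]
        intro s hs
        rcases pvMem_risesL hs with ⟨u, hu, rfl⟩
        have := hgt u hu
        simp
        omega
      rw [List.foldl_cons, hstep, ih _ _ hp', hrise, hfall]
      simp only [pvSpecMap, List.map_cons, hfilt]
      simp [List.append_assoc]
    · by_cases hr : z.getD (t + 1) 0 = 1 ∧ z.getD t 0 = 0
      · -- rising edge at t, new x_init = t+1
        have hstep : pvStepA z (acc, xi) t = (acc, (t : Int) + 1) := by
          unfold pvStepA; rw [if_neg hf, if_pos hr]
        have hrise : pvRisesL z (t :: L) = ((t : Int) + 1) :: pvRisesL z L := by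
          unfold pvRisesL
          apply List.filterMap_cons_some
          rw [if_pos ⟨hr.2, hr.1⟩]
        have hfall : pvFallsL z (t :: L) = pvFallsL z L := by
          unfold pvFallsL
          apply List.filterMap_cons_none
          rw [if_neg]
          intro h
          rw [h.1] at hr
          exact absurd hr.2 (by norm_num)
        rw [List.foldl_cons, hstep, ih _ _ hp', hrise, hfall]
        congr 1
        unfold pvSpecMap
        apply List.map_congr_left
        intro e he
        rcases pvMem_fallsL he with ⟨u, hu, rfl⟩
        have hle : (t : Int) + 1 ≤ (u : Int) := by
          have := hgt u hu; omega
        rw [List.filter_cons, if_pos (by simpa using hle), pvGetLast?_getD_cons]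
      · -- no edge at t
        have hstep : pvStepA z (acc, xi) t = (acc, xi) := by
          unfold pvStepA; rw [if_neg hf, if_neg hr]
        have hrise : pvRisesL z (t :: L) = pvRisesL z L := by
          unfold pvRisesL
          apply List.filterMap_cons_none
          rw [if_neg]
          intro h
          exact hr ⟨h.2, h.1⟩
        have hfall : pvFallsL z (t :: L) = pvFallsL z L := by
          unfold pvFallsL
          apply List.filterMap_cons_none
          rw [if_neg]
          intro h
          exact hf ⟨h.2, h.1⟩
        rw [List.foldl_cons, hstep, ih _ _ hp', hrise, hfall]

-- pvAdvance splits off the (takeWhile ≤ e) prefix and remembers its last element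
theorem pvAdvance_spec (e : Int) : ∀ (S : List Int) (last : Int),
    pvAdvance e S last =
      (S.dropWhile (fun s => s ≤ e), ((S.takeWhile (fun s => s ≤ e)).getLast?).getD last) := by
  intro S
  induction S with
  | nil => intro last; rfl
  | cons s ss ih =>
    intro last
    by_cases h : s ≤ e
    · simp only [pvAdvance, List.dropWhile_cons, List.takeWhile_cons]
      rw [if_pos h, if_pos (by simpa using h), if_pos (by simpa using h), ih s, pvGetLast?_getD_cons]
    · simp only [pvAdvance, List.dropWhile_cons, List.takeWhile_cons]
      rw [if_neg h, if_neg (by simpa using h), if_neg (by simpa using h)]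
      rfl

-- on a strictly increasing list, filter ≤ e is the same as takeWhile ≤ e
theorem pvFilter_eq_takeWhile (e : Int) : ∀ (S : List Int), S.Pairwise (· < ·) →
    S.filter (fun s => s ≤ e) = S.takeWhile (fun s => s ≤ e) := by
  intro S
  induction S with
  | nil => intro _; rfl
  | cons s ss ih =>
    intro hp
    rcases List.pairwise_cons.mp hp with ⟨hlt, hp'⟩
    by_cases h : s ≤ e
    · rw [List.filter_cons, if_pos (by simpa using h), List.takeWhile_cons,
        if_pos (by simpa using h), ih hp']
    · rw [List.filter_cons, if_neg (by simpa using h), List.takeWhile_cons,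
        if_neg (by simpa using h), List.filter_eq_nil_iff.mpr]
      intro x hx
      have := hlt x hx
      simp
      omega

-- B's two-pointer loop computes pvSpecMap on sorted inputs
theorem pvPair_spec : ∀ (E S : List Int) (last : Int),
    S.Pairwise (· < ·) → E.Pairwise (· ≤ ·) →
    pvPair E S last = pvSpecMap E S last := by
  intro E
  induction E with
  | nil => intro S last _ _; rfl
  | cons e es ih =>
    intro S last hS hE
    rcases List.pairwise_cons.mp hE with ⟨hle, hE'⟩
    have hS' : (S.dropWhile (fun s => s ≤ e)).Pairwise (· < ·) :=
      List.Pairwise.sublist (List.dropWhile_sublist _) hS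
    have hfilt := pvFilter_eq_takeWhile e S hS
    simp only [pvPair, pvAdvance_spec, pvSpecMap, List.map_cons]
    rw [hfilt, ih _ _ hS' hE']
    congr 1
    unfold pvSpecMap
    apply List.map_congr_left
    intro e' he'
    have hee' : e ≤ e' := hle e' he'
    have hfe' : S.filter (fun s => s ≤ e') =
        S.takeWhile (fun s => s ≤ e) ++ (S.dropWhile (fun s => s ≤ e)).filter (fun s => s ≤ e') := by
      conv_lhs => rw [← List.takeWhile_append_dropWhile (p := fun s => decide (s ≤ e)) (l := S)]
      rw [List.filter_append]
      congr 1
      rw [List.filter_eq_self]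
      intro a ha
      have := List.mem_takeWhile_imp ha
      simp at this ⊢
      omega
    rw [hfe', pvGetLast?_getD_append]

-- the two edge lists are sorted (indices come from List.range in increasing order)
theorem pvRises_sorted (z : List Int) : (pvRises z).Pairwise (· < ·) := by
  unfold pvRises
  rw [List.pairwise_filterMap]
  apply List.Pairwise.imp ?_ (List.pairwise_lt_range (n := z.length - 1))
  intro a b hab x hx y hy
  by_cases ha : z.getD a 0 = 0 ∧ z.getD (a + 1) 0 = 1
  · rw [if_pos ha] at hx
    by_cases hb : z.getD b 0 = 0 ∧ z.getD (b + 1) 0 = 1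
    · rw [if_pos hb] at hy
      have := Option.some.inj hx
      have := Option.some.inj hy
      omega
    · rw [if_neg hb] at hy
      exact absurd hy (by simp)
  · rw [if_neg ha] at hx
    exact absurd hx (by simp)

theorem pvFalls_sorted (z : List Int) : (pvFalls z).Pairwise (· ≤ ·) := by
  unfold pvFalls
  rw [List.pairwise_filterMap]
  apply List.Pairwise.imp ?_ (List.pairwise_lt_range (n := z.length - 1))
  intro a b hab x hx y hy
  by_cases ha : z.getD a 0 = 1 ∧ z.getD (a + 1) 0 = 0
  · rw [if_pos ha] at hx
    by_cases hb : z.getD b 0 = 1 ∧ z.getD (b + 1) 0 = 0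
    · rw [if_pos hb] at hy
      have := Option.some.inj hx
      have := Option.some.inj hy
      omega
    · rw [if_neg hb] at hy
      exact absurd hy (by simp)
  · rw [if_neg ha] at hx
    exact absurd hx (by simp)

-- B's edge lists are the generic ones over range
theorem pvRises_eq (z : List Int) : pvRises z = pvRisesL z (List.range (z.length - 1)) := rfl
theorem pvFalls_eq (z : List Int) : pvFalls z = pvFallsL z (List.range (z.length - 1)) := rfl

-- ===== VERDICT (by name: the statement is the Claim_ definition above) =====
theorem find_dishonest_intervals_spec : Claim_equal_find_dishonest_intervals := by
  intro z _
  unfold Spec_find_dishonest_intervals find_dishonest_intervals find_dishonest_intervals_alt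
  rw [pvLoopA z (List.range (z.length - 1)) [] 0 (List.pairwise_lt_range)]
  rw [pvPair_spec _ _ _ (pvRises_sorted z) (pvFalls_sorted z)]
  rw [pvRises_eq, pvFalls_eq]
  rfl
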